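-- pv_equiv track=rewrite | github.com/wabbit-corp/kotlin-random | tools/export_random123_vectors.py | splitmix64_state
-- ===== SOURCE A (Python) =====
-- def splitmix64_state(seed: int) -> list[int]:
--     gamma = 0x9E3779B97F4A7C15
--     state = seed & ((1 << 64) - 1)
--     words = []
--     while len(words) < 4:
--         state = (state + gamma) & ((1 << 64) - 1)
--         z = state
--         z = ((z ^ (z >> 30)) * 0xBF58476D1CE4E5B9) & ((1 << 64) - 1)
--         z = ((z ^ (z >> 27)) * 0x94D049BB133111EB) & ((1 << 64) - 1)
--         z ^= z >> 31
--         words.append(z & ((1 << 64) - 1))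
--     return words
-- ===== SOURCE B (Python) =====
-- def splitmix64_state(seed: int) -> list[int]:
--     # 32-bit limb arithmetic: every 64-bit value is a (hi, lo) pair of 32-bit words.
--     M = 0xFFFFFFFF
--
--     def add(ah, al, bh, bl):
--         s = al + bl
--         return (ah + bh + (s >> 32)) & M, s & M
--
--     def xor(ah, al, bh, bl):
--         return ah ^ bh, al ^ bl
--
--     def shr(ah, al, k):  # 0 < k < 32
--         return ah >> k, ((ah & ((1 << k) - 1)) << (32 - k)) | (al >> k)
--
--     def mul(ah, al, bh, bl):  # product mod 2**64
--         p = al * bl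
--         return (ah * bl + al * bh + (p >> 32)) & M, p & M
--
--     def mix(h, l):
--         h, l = mul(*xor(h, l, *shr(h, l, 30)), 0xBF58476D, 0x1CE4E5B9)
--         h, l = mul(*xor(h, l, *shr(h, l, 27)), 0x94D049BB, 0x133111EB)
--         return xor(h, l, *shr(h, l, 31))
--
--     s = seed & ((1 << 64) - 1)
--     sh, sl = (s >> 32) & M, s & M
--     out = []
--     for _ in range(4):
--         sh, sl = add(sh, sl, 0x9E3779B9, 0x7F4A7C15)
--         h, l = mix(sh, sl)
--         out.append((h << 32) | l)
--     return out
-- ===== Notes on version B (the rewrite author's own statement) =====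
-- stated objective: alternative
-- what changed: B represents every 64-bit quantity as a pair of 32-bit limbs and implements the state advance and the splitmix64 finalizer with hand-written limb arithmetic (carry propagation for add, cross-product/carry formula for multiply mod 2^64, limb-wise xor and cross-limb shifts), instead of A's full-width Python integers masked to 64 bits.
import Mathlib
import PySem

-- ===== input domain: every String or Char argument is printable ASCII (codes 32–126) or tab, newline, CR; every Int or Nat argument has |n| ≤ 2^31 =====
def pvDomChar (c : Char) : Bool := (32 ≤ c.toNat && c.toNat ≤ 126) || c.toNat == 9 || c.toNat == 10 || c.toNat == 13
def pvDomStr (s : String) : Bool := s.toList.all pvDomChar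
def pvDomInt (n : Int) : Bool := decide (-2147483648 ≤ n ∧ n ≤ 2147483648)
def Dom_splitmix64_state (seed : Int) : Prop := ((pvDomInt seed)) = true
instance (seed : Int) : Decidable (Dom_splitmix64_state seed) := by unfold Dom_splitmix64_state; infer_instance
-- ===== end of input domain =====

-- B computes the same four splitmix64 words with 32-bit limb arithmetic (each 64-bit value a
-- (hi, lo) pair with hand-propagated carries and cross products) instead of A's full-width
-- masked integers; alternative representation, no speed claim.

-- ===== PORT A =====
-- the Python literal (1 << 64) - 1
def smMask : Int := (1 <<< (64 : Nat)) - 1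

-- A's `while len(words) < 4` loop; fuel only makes the recursion structural, the guard is A's
def smLoop : Nat → Int → Int → List Int → List Int
  | 0, _, _, words => words
  | n + 1, gamma, state, words =>
    if words.length < 4 then
      let state' := PySem.Int.band (state + gamma) smMask
      let z := state'
      let z := PySem.Int.band ((PySem.Int.bxor z (z >>> (30 : Nat))) * 0xBF58476D1CE4E5B9) smMask
      let z := PySem.Int.band ((PySem.Int.bxor z (z >>> (27 : Nat))) * 0x94D049BB133111EB) smMask
      let z := PySem.Int.bxor z (z >>> (31 : Nat))
      smLoop n gamma state' (words ++ [PySem.Int.band z smMask])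
    else words

def splitmix64_state (seed : Int) : List Int :=
  let gamma : Int := 0x9E3779B97F4A7C15
  let state := PySem.Int.band seed smMask
  smLoop 4 gamma state []

-- ===== PORT B =====
-- Source B's M = 0xFFFFFFFF
def sm32M : Int := 0xFFFFFFFF

-- Source B's add(ah, al, bh, bl)
def smAdd (ah al bh bl : Int) : Int × Int :=
  let s := al + bl
  (PySem.Int.band (ah + bh + (s >>> (32 : Nat))) sm32M, PySem.Int.band s sm32M)

-- Source B's xor(ah, al, bh, bl)
def smXor (ah al bh bl : Int) : Int × Int :=
  (PySem.Int.bxor ah bh, PySem.Int.bxor al bl)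

-- Source B's shr(ah, al, k)
def smShr (ah al : Int) (k : Nat) : Int × Int :=
  (ah >>> k,
   PySem.Int.bor ((PySem.Int.band ah ((1 <<< k) - 1)) <<< (32 - k)) (al >>> k))

-- Source B's mul(ah, al, bh, bl)
def smMul (ah al bh bl : Int) : Int × Int :=
  let p := al * bl
  (PySem.Int.band (ah * bl + al * bh + (p >>> (32 : Nat))) sm32M, PySem.Int.band p sm32M)

-- Source B's mix(h, l)
def smMix (h l : Int) : Int × Int :=
  let s1 := smShr h l 30
  let t1 := smXor h l s1.1 s1.2
  let m1 := smMul t1.1 t1.2 0xBF58476D 0x1CE4E5B9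
  let s2 := smShr m1.1 m1.2 27
  let t2 := smXor m1.1 m1.2 s2.1 s2.2
  let m2 := smMul t2.1 t2.2 0x94D049BB 0x133111EB
  let s3 := smShr m2.1 m2.2 31
  smXor m2.1 m2.2 s3.1 s3.2

-- Source B's `for _ in range(4)` loop over the limb state
def smAltLoop : Nat → Int → Int → List Int → List Int
  | 0, _, _, out => out
  | n + 1, sh, sl, out =>
    let s := smAdd sh sl 0x9E3779B9 0x7F4A7C15
    let w := smMix s.1 s.2
    smAltLoop n s.1 s.2 (out ++ [PySem.Int.bor (w.1 <<< (32 : Nat)) w.2])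

def splitmix64_state_alt (seed : Int) : List Int :=
  let s := PySem.Int.band seed ((1 <<< (64 : Nat)) - 1)
  let sh := PySem.Int.band (s >>> (32 : Nat)) sm32M
  let sl := PySem.Int.band s sm32M
  smAltLoop 4 sh sl []

-- ===== PRECONDITION & SPEC =====
def Spec_splitmix64_state (seed : Int) (out : List Int) : Prop := out = splitmix64_state_alt seed
instance (seed : Int) (out : List Int) : Decidable (Spec_splitmix64_state seed out) := by unfold Spec_splitmix64_state; infer_instance

-- ===== CLAIM (what is proved, stated in full; the proofs are below) =====
def Claim_equal_splitmix64_state : Prop := ∀ (seed : Int), Dom_splitmix64_state seed → Spec_splitmix64_state seed (splitmix64_state seed)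

-- ===== LEMMAS AND PROOFS =====

-- Nat model of A's mixing of one state value (the three xor/mul/mask steps)
def nMix (z : Nat) : Nat :=
  let z1 := ((z ^^^ z >>> 30) * 0xBF58476D1CE4E5B9) % 2 ^ 64
  let z2 := ((z1 ^^^ z1 >>> 27) * 0x94D049BB133111EB) % 2 ^ 64
  (z2 ^^^ z2 >>> 31) % 2 ^ 64

lemma band_mask_natCast (n : Nat) :
    PySem.Int.band (↑n) smMask = ((n % 2 ^ 64 : Nat) : Int) := by
  have hm : smMask = ((2 ^ 64 - 1 : Nat) : Int) := by decide
  rw [hm, PySem.Int.band_natCast, Nat.and_two_pow_sub_one_eq_mod]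

lemma band_32M_natCast (n : Nat) :
    PySem.Int.band (↑n) sm32M = ((n % 2 ^ 32 : Nat) : Int) := by
  have hm : sm32M = ((2 ^ 32 - 1 : Nat) : Int) := by decide
  rw [hm, PySem.Int.band_natCast, Nat.and_two_pow_sub_one_eq_mod]

-- disjoint or is addition: a shifted hi limb never overlaps a small lo part
lemma or_disjoint (c d m : Nat) (hd : d < 2 ^ m) : (c * 2 ^ m) ||| d = c * 2 ^ m + d := by
  have h1 : ((c * 2 ^ m) ||| d) / 2 ^ m = c := by
    rw [← Nat.shiftRight_eq_div_pow, Nat.shiftRight_or_distrib,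
      Nat.shiftRight_eq_div_pow, Nat.shiftRight_eq_div_pow,
      Nat.mul_div_cancel _ (Nat.two_pow_pos m),
      Nat.div_eq_of_lt hd, Nat.or_zero]
  have h2 : ((c * 2 ^ m) ||| d) % 2 ^ m = d := by
    rw [← Nat.and_two_pow_sub_one_eq_mod, Nat.and_or_distrib_right,
      Nat.and_two_pow_sub_one_eq_mod, Nat.and_two_pow_sub_one_eq_mod,
      Nat.mul_mod_left, Nat.mod_eq_of_lt hd, Nat.zero_or]
  conv_lhs => rw [← Nat.div_add_mod ((c * 2 ^ m) ||| d) (2 ^ m), h1, h2]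
  ring

-- how xor splits over the two 32-bit limbs
lemma nat_xor_hi (x y : Nat) : (x ^^^ y) / 2 ^ 32 = x / 2 ^ 32 ^^^ y / 2 ^ 32 := by
  rw [← Nat.shiftRight_eq_div_pow, ← Nat.shiftRight_eq_div_pow, ← Nat.shiftRight_eq_div_pow,
    Nat.shiftRight_xor_distrib]

lemma nat_xor_lo (x y : Nat) : (x ^^^ y) % 2 ^ 32 = x % 2 ^ 32 ^^^ y % 2 ^ 32 := by
  rw [← Nat.and_two_pow_sub_one_eq_mod, ← Nat.and_two_pow_sub_one_eq_mod,
    ← Nat.and_two_pow_sub_one_eq_mod, Nat.and_xor_distrib_right]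

-- B's xor on the limbs of x and y is the limbs of x ^^^ y
lemma smXor_cast (x y : Nat) :
    smXor ((x / 2 ^ 32 : Nat) : Int) ((x % 2 ^ 32 : Nat) : Int)
          ((y / 2 ^ 32 : Nat) : Int) ((y % 2 ^ 32 : Nat) : Int)
      = ((((x ^^^ y) / 2 ^ 32 : Nat) : Int), (((x ^^^ y) % 2 ^ 32 : Nat) : Int)) := by
  simp only [smXor, PySem.Int.bxor_natCast, nat_xor_hi, nat_xor_lo]

-- B's shr on the limbs of x is the limbs of x >>> k (0 < k < 32)
lemma smShr_cast (x : Nat) (k : Nat) (h0 : 0 < k) (h32 : k < 32) :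
    smShr ((x / 2 ^ 32 : Nat) : Int) ((x % 2 ^ 32 : Nat) : Int) k
      = ((((x >>> k) / 2 ^ 32 : Nat) : Int), (((x >>> k) % 2 ^ 32 : Nat) : Int)) := by
  have hone : (((1 <<< k : Nat) : Nat) : Int) - 1 = (((2 ^ k - 1 : Nat)) : Int) := by
    rw [Nat.shiftLeft_eq, Nat.one_mul]
    have h1 : (1 : Nat) ≤ 2 ^ k := Nat.one_le_two_pow
    push_cast [h1]
    ring
  have hb : x % 2 ^ 32 < 2 ^ 32 := by omega
  unfold smShr
  rw [hone, PySem.Int.band_natCast, Nat.and_two_pow_sub_one_eq_mod,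
    ← Int.natCast_shiftRight, ← Int.natCast_shiftRight, ← Int.natCast_shiftLeft,
    PySem.Int.bor_natCast]
  have e1 : (2 : Nat) ^ 32 = 2 ^ k * 2 ^ (32 - k) := by rw [← pow_add]; congr 1; omega
  have hk2 : 0 < (2 : Nat) ^ k := Nat.two_pow_pos k
  have hl2 : 0 < (2 : Nat) ^ (32 - k) := Nat.two_pow_pos _
  have hdivlt : (x % 2 ^ 32) / 2 ^ k < 2 ^ (32 - k) := by
    refine Nat.div_lt_of_lt_mul (lt_of_lt_of_le hb (le_of_eq ?_))
    rw [← pow_add]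
    congr 1
    omega
  have key : ((x / 2 ^ 32) % 2 ^ k) <<< (32 - k) ||| (x % 2 ^ 32) >>> k
      = ((x >>> k) % 2 ^ 32 : Nat) := by
    rw [Nat.shiftLeft_eq, Nat.shiftRight_eq_div_pow, or_disjoint _ _ (32 - k) hdivlt,
      Nat.shiftRight_eq_div_pow]
    have hsplit : x / 2 ^ k
        = (x / 2 ^ 32 / 2 ^ k) * 2 ^ 32 + ((x / 2 ^ 32 % 2 ^ k) * 2 ^ (32 - k)
            + (x % 2 ^ 32) / 2 ^ k) := by
      have hx' : x = 2 ^ k * ((x / 2 ^ 32 / 2 ^ k) * 2 ^ 32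
          + (x / 2 ^ 32 % 2 ^ k) * 2 ^ (32 - k)) + x % 2 ^ 32 := by
        calc x = (x / 2 ^ 32) * 2 ^ 32 + x % 2 ^ 32 := by omega
        _ = ((x / 2 ^ 32 / 2 ^ k) * 2 ^ k + x / 2 ^ 32 % 2 ^ k) * 2 ^ 32 + x % 2 ^ 32 := by
            conv_rhs => rw [Nat.div_add_mod']
        _ = 2 ^ k * ((x / 2 ^ 32 / 2 ^ k) * 2 ^ 32
            + (x / 2 ^ 32 % 2 ^ k) * 2 ^ (32 - k)) + x % 2 ^ 32 := by
            rw [e1]; ring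
      conv_lhs => rw [hx']
      rw [Nat.mul_add_div hk2]
      ring
    have hlo1 : (x / 2 ^ 32 % 2 ^ k) * 2 ^ (32 - k) + (x % 2 ^ 32) / 2 ^ k < 2 ^ 32 := by
      have h1 : x / 2 ^ 32 % 2 ^ k ≤ 2 ^ k - 1 := by
        have := Nat.mod_lt (x / 2 ^ 32) hk2; omega
      calc (x / 2 ^ 32 % 2 ^ k) * 2 ^ (32 - k) + (x % 2 ^ 32) / 2 ^ k
          ≤ (2 ^ k - 1) * 2 ^ (32 - k) + ((2 ^ (32 - k)) - 1) := by
            exact Nat.add_le_add (Nat.mul_le_mul_right _ h1) (by omega)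
      _ < 2 ^ k * 2 ^ (32 - k) := by
            have h3 : (2 ^ k - 1) * 2 ^ (32 - k) + 2 ^ (32 - k) = 2 ^ k * 2 ^ (32 - k) := by
              have h4 : (1 : Nat) ≤ 2 ^ k := Nat.one_le_two_pow
              calc (2 ^ k - 1) * 2 ^ (32 - k) + 2 ^ (32 - k)
                  = (2 ^ k - 1 + 1) * 2 ^ (32 - k) := by ring
              _ = 2 ^ k * 2 ^ (32 - k) := by congr 1; omega
            omega
      _ = 2 ^ 32 := e1.symm
    rw [hsplit, Nat.add_comm (x / 2 ^ 32 / 2 ^ k * 2 ^ 32) _, Nat.add_mul_mod_self_right,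
      Nat.mod_eq_of_lt hlo1]
  rw [key]
  have keyhi : (x / 2 ^ 32) >>> k = ((x >>> k) / 2 ^ 32 : Nat) := by
    rw [Nat.shiftRight_eq_div_pow, Nat.shiftRight_eq_div_pow,
      Nat.div_div_eq_div_mul, Nat.div_div_eq_div_mul, Nat.mul_comm]
  rw [keyhi]

-- the limb product/carry formula computes the limbs of the 64-bit truncated product
lemma nat_mul_limb (x y : Nat) :
    (x / 2 ^ 32 * (y % 2 ^ 32) + x % 2 ^ 32 * (y / 2 ^ 32)
        + (x % 2 ^ 32 * (y % 2 ^ 32)) >>> 32) % 2 ^ 32 = x * y % 2 ^ 64 / 2 ^ 32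
      ∧ (x % 2 ^ 32 * (y % 2 ^ 32)) % 2 ^ 32 = x * y % 2 ^ 64 % 2 ^ 32 := by
  have hbd := Nat.div_add_mod (x % 2 ^ 32 * (y % 2 ^ 32)) (2 ^ 32)
  have hrlt : x % 2 ^ 32 * (y % 2 ^ 32) % 2 ^ 32 < 2 ^ 32 :=
    Nat.mod_lt _ (Nat.two_pow_pos 32)
  have hxy : x * y
      = ((x / 2 ^ 32) * (y / 2 ^ 32) * 2 ^ 32
          + (x / 2 ^ 32 * (y % 2 ^ 32) + x % 2 ^ 32 * (y / 2 ^ 32)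
              + x % 2 ^ 32 * (y % 2 ^ 32) / 2 ^ 32)) * 2 ^ 32
        + x % 2 ^ 32 * (y % 2 ^ 32) % 2 ^ 32 := by
    calc x * y
        = ((x / 2 ^ 32) * 2 ^ 32 + x % 2 ^ 32) * ((y / 2 ^ 32) * 2 ^ 32 + y % 2 ^ 32) := by
          rw [Nat.div_add_mod', Nat.div_add_mod']
    _ = ((x / 2 ^ 32) * (y / 2 ^ 32) * 2 ^ 32
          + (x / 2 ^ 32 * (y % 2 ^ 32) + x % 2 ^ 32 * (y / 2 ^ 32))) * 2 ^ 32
        + x % 2 ^ 32 * (y % 2 ^ 32) := by ring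
    _ = _ := by
          conv_lhs => rw [← hbd]
          ring
  have hmod : x * y % 2 ^ 64
      = (x / 2 ^ 32 * (y % 2 ^ 32) + x % 2 ^ 32 * (y / 2 ^ 32)
          + x % 2 ^ 32 * (y % 2 ^ 32) / 2 ^ 32) % 2 ^ 32 * 2 ^ 32
        + x % 2 ^ 32 * (y % 2 ^ 32) % 2 ^ 32 := by
    rw [hxy]
    have h64 : (2 : Nat) ^ 64 = 2 ^ 32 * 2 ^ 32 := by norm_num
    rw [h64, Nat.add_mod, Nat.mul_mod_mul_right, Nat.mod_eq_of_lt (by omega : x % 2 ^ 32 * (y % 2 ^ 32) % 2 ^ 32 < 2 ^ 32 * 2 ^ 32)]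
    rw [Nat.add_comm ((x / 2 ^ 32) * (y / 2 ^ 32) * 2 ^ 32) _, Nat.add_mul_mod_self_right]
    have hmb : (x / 2 ^ 32 * (y % 2 ^ 32) + x % 2 ^ 32 * (y / 2 ^ 32)
        + x % 2 ^ 32 * (y % 2 ^ 32) / 2 ^ 32) % 2 ^ 32 < 2 ^ 32 := Nat.mod_lt _ (Nat.two_pow_pos 32)
    exact Nat.mod_eq_of_lt (by omega)
  constructor
  · rw [hmod, Nat.shiftRight_eq_div_pow]
    rw [show (x / 2 ^ 32 * (y % 2 ^ 32) + x % 2 ^ 32 * (y / 2 ^ 32)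
        + x % 2 ^ 32 * (y % 2 ^ 32) / 2 ^ 32) % 2 ^ 32 * 2 ^ 32
        + x % 2 ^ 32 * (y % 2 ^ 32) % 2 ^ 32
      = 2 ^ 32 * ((x / 2 ^ 32 * (y % 2 ^ 32) + x % 2 ^ 32 * (y / 2 ^ 32)
        + x % 2 ^ 32 * (y % 2 ^ 32) / 2 ^ 32) % 2 ^ 32)
        + x % 2 ^ 32 * (y % 2 ^ 32) % 2 ^ 32 from by ring]
    rw [Nat.mul_add_div (Nat.two_pow_pos 32), Nat.div_eq_of_lt hrlt, Nat.add_zero]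
  · rw [hmod, Nat.add_comm, Nat.add_mul_mod_self_right, Nat.mod_eq_of_lt hrlt]

-- B's mul on the limbs of x and y is the limbs of x * y % 2^64
lemma smMul_cast (x y : Nat) :
    smMul ((x / 2 ^ 32 : Nat) : Int) ((x % 2 ^ 32 : Nat) : Int)
          ((y / 2 ^ 32 : Nat) : Int) ((y % 2 ^ 32 : Nat) : Int)
      = ((((x * y % 2 ^ 64) / 2 ^ 32 : Nat) : Int), (((x * y % 2 ^ 64) % 2 ^ 32 : Nat) : Int)) := by
  obtain ⟨h1, h2⟩ := nat_mul_limb x y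
  simp only [smMul]
  rw [show (((x % 2 ^ 32 : Nat) : Int) * ((y % 2 ^ 32 : Nat) : Int))
      = ((x % 2 ^ 32 * (y % 2 ^ 32) : Nat) : Int) from by push_cast; ring,
    ← Int.natCast_shiftRight]
  rw [show (((x / 2 ^ 32 : Nat) : Int) * ((y % 2 ^ 32 : Nat) : Int)
        + ((x % 2 ^ 32 : Nat) : Int) * ((y / 2 ^ 32 : Nat) : Int)
        + (((x % 2 ^ 32 * (y % 2 ^ 32)) >>> 32 : Nat) : Int))
      = ((x / 2 ^ 32 * (y % 2 ^ 32) + x % 2 ^ 32 * (y / 2 ^ 32)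
          + (x % 2 ^ 32 * (y % 2 ^ 32)) >>> 32 : Nat) : Int) from by push_cast; ring]
  rw [band_32M_natCast, band_32M_natCast, h1, h2]

-- B's add on the limbs of x and y is the limbs of (x + y) % 2^64
lemma smAdd_cast (x y : Nat) :
    smAdd ((x / 2 ^ 32 : Nat) : Int) ((x % 2 ^ 32 : Nat) : Int)
          ((y / 2 ^ 32 : Nat) : Int) ((y % 2 ^ 32 : Nat) : Int)
      = (((((x + y) % 2 ^ 64) / 2 ^ 32 : Nat) : Int), ((((x + y) % 2 ^ 64) % 2 ^ 32 : Nat) : Int)) := by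
  simp only [smAdd]
  rw [show (((x % 2 ^ 32 : Nat) : Int) + ((y % 2 ^ 32 : Nat) : Int))
      = ((x % 2 ^ 32 + y % 2 ^ 32 : Nat) : Int) from by push_cast; ring,
    ← Int.natCast_shiftRight]
  rw [show (((x / 2 ^ 32 : Nat) : Int) + ((y / 2 ^ 32 : Nat) : Int)
        + (((x % 2 ^ 32 + y % 2 ^ 32) >>> 32 : Nat) : Int))
      = ((x / 2 ^ 32 + y / 2 ^ 32 + (x % 2 ^ 32 + y % 2 ^ 32) >>> 32 : Nat) : Int) from by push_cast; ring]
  rw [band_32M_natCast, band_32M_natCast]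
  rw [show (x / 2 ^ 32 + y / 2 ^ 32 + (x % 2 ^ 32 + y % 2 ^ 32) >>> 32) % 2 ^ 32
      = (x + y) % 2 ^ 64 / 2 ^ 32 from by rw [Nat.shiftRight_eq_div_pow]; omega]
  rw [show (x % 2 ^ 32 + y % 2 ^ 32) % 2 ^ 32 = (x + y) % 2 ^ 64 % 2 ^ 32 from by omega]

-- B's mix on the limbs of x is the limbs of nMix x
lemma smMix_cast (x : Nat) :
    smMix ((x / 2 ^ 32 : Nat) : Int) ((x % 2 ^ 32 : Nat) : Int)
      = ((((nMix x) / 2 ^ 32 : Nat) : Int), (((nMix x) % 2 ^ 32 : Nat) : Int)) := by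
  have hz2 : (((x ^^^ x >>> 30) * 0xBF58476D1CE4E5B9 % 2 ^ 64)
      ^^^ ((x ^^^ x >>> 30) * 0xBF58476D1CE4E5B9 % 2 ^ 64) >>> 27)
        * 0x94D049BB133111EB % 2 ^ 64 < 2 ^ 64 := Nat.mod_lt _ (Nat.two_pow_pos 64)
  simp only [smMix, nMix]
  rw [smShr_cast x 30 (by norm_num) (by norm_num)]
  simp only
  rw [smXor_cast x (x >>> 30)]
  simp only
  rw [show (0xBF58476D : Int) = (((0xBF58476D1CE4E5B9 : Nat) / 2 ^ 32 : Nat) : Int) from by norm_num,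
    show (0x1CE4E5B9 : Int) = (((0xBF58476D1CE4E5B9 : Nat) % 2 ^ 32 : Nat) : Int) from by norm_num]
  rw [smMul_cast (x ^^^ x >>> 30) 0xBF58476D1CE4E5B9]
  simp only
  rw [smShr_cast _ 27 (by norm_num) (by norm_num)]
  simp only
  rw [smXor_cast]
  simp only
  rw [show (0x94D049BB : Int) = (((0x94D049BB133111EB : Nat) / 2 ^ 32 : Nat) : Int) from by norm_num,
    show (0x133111EB : Int) = (((0x94D049BB133111EB : Nat) % 2 ^ 32 : Nat) : Int) from by norm_num]
  rw [smMul_cast]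
  simp only
  rw [smShr_cast _ 31 (by norm_num) (by norm_num)]
  simp only
  have hfin : ((((x ^^^ x >>> 30) * 0xBF58476D1CE4E5B9 % 2 ^ 64)
      ^^^ ((x ^^^ x >>> 30) * 0xBF58476D1CE4E5B9 % 2 ^ 64) >>> 27)
        * 0x94D049BB133111EB % 2 ^ 64)
      ^^^ ((((x ^^^ x >>> 30) * 0xBF58476D1CE4E5B9 % 2 ^ 64)
      ^^^ ((x ^^^ x >>> 30) * 0xBF58476D1CE4E5B9 % 2 ^ 64) >>> 27)
        * 0x94D049BB133111EB % 2 ^ 64) >>> 31 < 2 ^ 64 :=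
    Nat.xor_lt_two_pow hz2 (lt_of_le_of_lt (Nat.shiftRight_le _ 31) hz2)
  rw [Nat.mod_eq_of_lt hfin]
  rw [smXor_cast]

-- B's packed word is the Nat value itself
lemma pack_word (h l : Nat) (hl : l < 2 ^ 32) :
    PySem.Int.bor (((h : Nat) : Int) <<< (32 : Nat)) ((l : Nat) : Int)
      = ((h * 2 ^ 32 + l : Nat) : Int) := by
  rw [← Int.natCast_shiftLeft, PySem.Int.bor_natCast, Nat.shiftLeft_eq, or_disjoint _ _ _ hl]

-- rewriting A's multiplier/gamma literals as casts
lemma mstepA (m c : Nat) (k : Nat) :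
    PySem.Int.band ((PySem.Int.bxor ((m : Nat) : Int) (((m : Nat) : Int) >>> k)) * ((c : Nat) : Int)) smMask
      = (((m ^^^ m >>> k) * c % 2 ^ 64 : Nat) : Int) := by
  rw [← Int.natCast_shiftRight, PySem.Int.bxor_natCast, ← Nat.cast_mul, band_mask_natCast]

lemma xstepA (m : Nat) (k : Nat) :
    PySem.Int.bxor ((m : Nat) : Int) (((m : Nat) : Int) >>> k) = ((m ^^^ m >>> k : Nat) : Int) := by
  rw [← Int.natCast_shiftRight, PySem.Int.bxor_natCast]

-- A's loop and B's loop agree when B carries the limbs of A's state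
lemma loop_eq : ∀ (n : Nat) (w : List Int) (s : Nat), s < 2 ^ 64 → w.length + n = 4 →
    smLoop n 0x9E3779B97F4A7C15 ((s : Nat) : Int) w
      = smAltLoop n ((s / 2 ^ 32 : Nat) : Int) ((s % 2 ^ 32 : Nat) : Int) w := by
  intro n
  induction n with
  | zero => intro w s _ _; simp [smLoop, smAltLoop]
  | succ n ih =>
    intro w s hs hw
    have h4 : w.length < 4 := by omega
    simp only [smLoop, smAltLoop, h4, if_true]
    rw [show (0x9E3779B97F4A7C15 : Int) = ((0x9E3779B97F4A7C15 : Nat) : Int) from by norm_num,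
      show (0x9E3779B9 : Int) = (((0x9E3779B97F4A7C15 : Nat) / 2 ^ 32 : Nat) : Int) from by norm_num,
      show (0x7F4A7C15 : Int) = (((0x9E3779B97F4A7C15 : Nat) % 2 ^ 32 : Nat) : Int) from by norm_num]
    rw [← Nat.cast_add, band_mask_natCast]
    rw [smAdd_cast s 0x9E3779B97F4A7C15]
    simp only
    have hs' : (s + 0x9E3779B97F4A7C15) % 2 ^ 64 < 2 ^ 64 := Nat.mod_lt _ (Nat.two_pow_pos 64)
    rw [show (0xBF58476D1CE4E5B9 : Int) = ((0xBF58476D1CE4E5B9 : Nat) : Int) from by norm_num,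
      show (0x94D049BB133111EB : Int) = ((0x94D049BB133111EB : Nat) : Int) from by norm_num]
    rw [mstepA, mstepA, xstepA, band_mask_natCast]
    rw [smMix_cast]
    simp only
    rw [pack_word _ _ (by omega)]
    rw [show nMix ((s + 0x9E3779B97F4A7C15) % 2 ^ 64) / 2 ^ 32 * 2 ^ 32
        + nMix ((s + 0x9E3779B97F4A7C15) % 2 ^ 64) % 2 ^ 32
      = nMix ((s + 0x9E3779B97F4A7C15) % 2 ^ 64) from by omega]
    exact ih _ _ hs' (by simp; omega)

-- masking any domain seed yields a Nat below 2^64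
lemma band_seed (seed : Int) (h1 : -2147483648 ≤ seed) (h2 : seed ≤ 2147483648) :
    ∃ n : Nat, n < 2 ^ 64 ∧ PySem.Int.band seed ((1 <<< (64 : Nat)) - 1) = ((n : Nat) : Int) := by
  by_cases hpos : 0 ≤ seed
  · refine ⟨seed.toNat &&& ((1 <<< (64 : Nat)) - 1 : Int).toNat, ?_, ?_⟩
    · have : seed.toNat &&& ((1 <<< (64 : Nat)) - 1 : Int).toNat
          ≤ ((1 <<< (64 : Nat)) - 1 : Int).toNat := Nat.and_le_right
      have h64 : ((1 <<< (64 : Nat)) - 1 : Int).toNat = 2 ^ 64 - 1 := by decide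
      omega
    · exact PySem.Int.band_of_nonneg hpos (by decide)
  · have hneg : seed < 0 := by omega
    obtain ⟨m, hm⟩ : ∃ m : Nat, seed = -(m : Int) := ⟨(-seed).toNat, by omega⟩
    subst hm
    have hm1 : 1 ≤ m := by omega
    have hm2 : m ≤ 2 ^ 31 := by omega
    refine ⟨2 ^ 64 - m, by omega, ?_⟩
    simp only [PySem.Int.band]
    rw [if_neg (by omega), if_pos (by decide)]
    have e1 : (((1 <<< (64 : Nat)) - 1 : Int)).toNat = 2 ^ 64 - 1 := by decide
    have e2 : (-(-(m : Int)) - 1).toNat = m - 1 := by omega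
    rw [e1, e2, Nat.and_comm, Nat.and_two_pow_sub_one_eq_mod, Nat.mod_eq_of_lt (by omega)]
    congr 1
    omega

-- ===== VERDICT (by name: the statement is the Claim_ definition above) =====
theorem splitmix64_state_spec : Claim_equal_splitmix64_state := by
  intro seed hdom
  have hd : -2147483648 ≤ seed ∧ seed ≤ 2147483648 := by
    have := hdom
    unfold Dom_splitmix64_state pvDomInt at this
    exact of_decide_eq_true this
  obtain ⟨n, hn, heq⟩ := band_seed seed hd.1 hd.2
  unfold Spec_splitmix64_state splitmix64_state splitmix64_state_alt
  simp only
  rw [show smMask = (1 <<< (64 : Nat)) - 1 from rfl, heq]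
  rw [← Int.natCast_shiftRight, band_32M_natCast, band_32M_natCast]
  rw [show (n >>> 32) % 2 ^ 32 = n / 2 ^ 32 from by rw [Nat.shiftRight_eq_div_pow]; omega]
  exact loop_eq 4 [] n hn (by simp)
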